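-- pv_equiv track=rewrite | github.com/lesh23/CodingTest_Practice | HJ/Lv0.py | solution
-- ===== SOURCE A (Python) =====
-- def solution(numbers, k):
--     if len(numbers) % 2 == 0:
--         evens = []
--         for x in range(0,len(numbers),2):
--             evens.append(numbers[x])
--         return evens[(k%len(evens)) - 1]
--     elif len(numbers) % 2 != 0:
--         odds = []
--         for i in range(2):
--             for x in range(i,len(numbers),2):
--                 odds.append(numbers[x])
--         return odds[(k%len(odds)) - 1]
-- ===== SOURCE B (Python) =====
-- def solution(numbers, k):
--     # O(1): compute the target position directly instead of materialising the
--     # even/odd-strided subsequence.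
--     n = len(numbers)
--     if n % 2 == 0:
--         m = n // 2
--         return numbers[2 * ((k - 1) % m)]
--     e = (n + 1) // 2
--     j = (k - 1) % n
--     if j < e:
--         return numbers[2 * j]
--     return numbers[2 * (j - e) + 1]
-- ===== Notes on version B (the rewrite author's own statement) =====
-- stated objective: faster
-- what changed: Instead of building the even-index (and for odd length also odd-index) subsequence element by element and indexing into it with a possibly negative index, B computes the target position in the original list in closed form ((k-1) mod the subsequence length, mapped back to the original index) and does a single O(1) access.
import Mathlib
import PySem

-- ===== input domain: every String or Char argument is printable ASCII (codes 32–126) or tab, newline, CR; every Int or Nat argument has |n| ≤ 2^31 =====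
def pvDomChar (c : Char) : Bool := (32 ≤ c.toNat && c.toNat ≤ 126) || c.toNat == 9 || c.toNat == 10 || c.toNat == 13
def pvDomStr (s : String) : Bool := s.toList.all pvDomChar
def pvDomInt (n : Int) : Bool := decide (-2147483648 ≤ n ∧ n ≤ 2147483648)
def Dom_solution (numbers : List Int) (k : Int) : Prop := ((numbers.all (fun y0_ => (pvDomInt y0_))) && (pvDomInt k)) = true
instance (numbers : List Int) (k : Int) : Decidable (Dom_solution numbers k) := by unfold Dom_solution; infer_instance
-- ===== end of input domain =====

-- B replaces A's O(n) construction of the strided subsequence by an O(1) closed-form index computation (objective: faster; 'asymptotic' per the reviewer hint, subject to a timing run).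


-- ===== PORT A =====
def solution (numbers : List Int) (k : Int) : Int :=
  if PySem.Int.mod (numbers.length : Int) 2 = 0 then
    let evens := (PySem.List.pyRange 0 (numbers.length : Int) 2).foldl
      (fun acc x => acc ++ [PySem.List.pyGetD numbers x 0]) []
    PySem.List.pyGetD evens (PySem.Int.mod k (evens.length : Int) - 1) 0
  else
    let odds := (PySem.List.pyRange 0 2 1).foldl
      (fun acc i => (PySem.List.pyRange i (numbers.length : Int) 2).foldl
        (fun acc2 x => acc2 ++ [PySem.List.pyGetD numbers x 0]) acc) []
    PySem.List.pyGetD odds (PySem.Int.mod k (odds.length : Int) - 1) 0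

-- ===== PORT B =====
def solution_alt (numbers : List Int) (k : Int) : Int :=
  let n : Int := (numbers.length : Int)
  if PySem.Int.mod n 2 = 0 then
    let m := PySem.Int.floordiv n 2
    PySem.List.pyGetD numbers (2 * PySem.Int.mod (k - 1) m) 0
  else
    let e := PySem.Int.floordiv (n + 1) 2
    let j := PySem.Int.mod (k - 1) n
    if j < e then PySem.List.pyGetD numbers (2 * j) 0
    else PySem.List.pyGetD numbers (2 * (j - e) + 1) 0

-- ===== PRECONDITION & SPEC =====
-- Pre_ excludes only the empty list, on which A raises ZeroDivisionError (k % len of an empty subsequence).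
def Pre_solution (numbers : List Int) (k : Int) : Prop := numbers ≠ []
instance (numbers : List Int) (k : Int) : Decidable (Pre_solution numbers k) := by unfold Pre_solution; infer_instance
def pvWitness_solution : List Int × Int := ([3, 1, 4, 1], 7)

def Spec_solution (numbers : List Int) (k : Int) (out : Int) : Prop := out = solution_alt numbers k
instance (numbers : List Int) (k : Int) (out : Int) : Decidable (Spec_solution numbers k out) := by unfold Spec_solution; infer_instance

-- ===== CLAIM (what is proved, stated in full; the proofs are below) =====
def Claim_equal_solution : Prop := ∀ (numbers : List Int) (k : Int), Dom_solution numbers k → Pre_solution numbers k → Spec_solution numbers k (solution numbers k)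

-- ===== LEMMAS AND PROOFS =====
-- arithmetic: (k-1) mod c  from  k mod c
lemma mod_pred_eq (k : Int) (c : Int) (hc : 0 < c) :
    PySem.Int.mod (k - 1) c =
      if PySem.Int.mod k c = 0 then c - 1 else PySem.Int.mod k c - 1 := by
  rw [PySem.Int.mod_eq_emod_of_pos hc, PySem.Int.mod_eq_emod_of_pos hc]
  have hv0 : 0 ≤ k % c := Int.emod_nonneg k (by omega)
  have hv1 : k % c < c := Int.emod_lt_of_pos k hc
  have hk : c * (k / c) + k % c = k := Int.mul_ediv_add_emod k c
  by_cases h : k % c = 0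
  · simp only [h, if_pos]
    have h1 : k - 1 = (c - 1) + c * (k / c - 1) := by rw [Int.mul_sub]; omega
    rw [h1, Int.add_mul_emod_self_left, Int.emod_eq_of_lt (by omega) (by omega)]
  · simp only [h, if_false]
    have h1 : k - 1 = (k % c - 1) + c * (k / c) := by omega
    rw [h1, Int.add_mul_emod_self_left, Int.emod_eq_of_lt (by omega) (by omega)]

-- the even-index strided pass
lemma ev_list (xs : List Int) :
    (PySem.List.pyRange 0 (xs.length : Int) 2).foldl
        (fun acc x => acc ++ [PySem.List.pyGetD xs x 0]) [] =
      (List.range ((xs.length + 1) / 2)).map (fun t => xs.getD (2 * t) 0) := by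
  rw [PySem.List.foldl_append_singleton_eq_map, PySem.List.pyRange_of_pos _ _ (by norm_num)]
  have hcount : (if (0:Int) < (xs.length : Int) then (((xs.length : Int) - 0 + 2 - 1) / 2).toNat else 0)
      = (xs.length + 1) / 2 := by
    rcases Nat.eq_zero_or_pos xs.length with h | h
    · simp [h]
    · rw [if_pos (by exact_mod_cast h)]
      have : ((xs.length : Int) - 0 + 2 - 1) = ((xs.length + 1 : Nat) : Int) := by push_cast; ring
      rw [this, show ((2:Int)) = ((2:Nat):Int) from rfl, ← Int.natCast_div, Int.toNat_natCast]
  rw [hcount, List.nil_append, List.map_map]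
  apply List.map_congr_left
  intro t _
  simp only [Function.comp]
  have : (0 : Int) + 2 * (t : Int) = ((2 * t : Nat) : Int) := by push_cast; ring
  rw [this, PySem.List.pyGetD_natCast]

-- the odd-index strided pass (started from 1), with any accumulator
lemma od_list (xs : List Int) (acc : List Int) :
    (PySem.List.pyRange 1 (xs.length : Int) 2).foldl
        (fun acc2 x => acc2 ++ [PySem.List.pyGetD xs x 0]) acc =
      acc ++ (List.range (xs.length / 2)).map (fun t => xs.getD (2 * t + 1) 0) := by
  rw [PySem.List.foldl_append_singleton_eq_map, PySem.List.pyRange_of_pos _ _ (by norm_num)]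
  have hcount : (if (1:Int) < (xs.length : Int) then (((xs.length : Int) - 1 + 2 - 1) / 2).toNat else 0)
      = xs.length / 2 := by
    rcases Nat.lt_or_ge 1 xs.length with h | h
    · rw [if_pos (by exact_mod_cast h)]
      have : ((xs.length : Int) - 1 + 2 - 1) = ((xs.length : Nat) : Int) := by ring
      rw [this, show ((2:Int)) = ((2:Nat):Int) from rfl, ← Int.natCast_div, Int.toNat_natCast]
    · interval_cases h' : xs.length <;> simp
  rw [hcount, List.map_map]
  congr 1
  apply List.map_congr_left
  intro t _
  simp only [Function.comp]
  have : (1 : Int) + 2 * (t : Int) = ((2 * t + 1 : Nat) : Int) := by push_cast; ring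
  rw [this, PySem.List.pyGetD_natCast]

lemma cat_getD (xs : List Int) (i : Nat) (hi : i < xs.length) :
    (((List.range ((xs.length + 1) / 2)).map (fun t => xs.getD (2 * t) 0)) ++
      ((List.range (xs.length / 2)).map (fun t => xs.getD (2 * t + 1) 0))).getD i 0 =
    if i < (xs.length + 1) / 2 then xs.getD (2 * i) 0
    else xs.getD (2 * (i - (xs.length + 1) / 2) + 1) 0 := by
  by_cases h : i < (xs.length + 1) / 2
  · rw [if_pos h, List.getD_append _ _ _ _ (by simpa using h),
      PySem.List.getD_map_range _ _ _ _ h]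
  · rw [if_neg h, List.getD_append_right _ _ _ _ (by simpa using h)]
    simp only [List.length_map, List.length_range]
    rw [PySem.List.getD_map_range _ _ _ _ (by omega)]

-- ===== VERDICT (by name: the statement is the Claim_ definition above) =====
theorem solution_spec : Claim_equal_solution := by
  intro numbers k _ hpre
  unfold Spec_solution solution solution_alt
  have hn0 : 0 < numbers.length := List.length_pos_iff.mpr hpre
  have hmod2 : PySem.Int.mod (numbers.length : Int) 2 = ((numbers.length % 2 : Nat) : Int) := by
    exact_mod_cast PySem.Int.mod_natCast numbers.length 2
  by_cases hpar : numbers.length % 2 = 0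
  · -- even length
    have hc : PySem.Int.mod (numbers.length : Int) 2 = 0 := by
      rw [hmod2]; exact_mod_cast hpar
    rw [if_pos hc, if_pos hc, ev_list numbers]
    simp only [List.length_map, List.length_range]
    have he0 : 0 < (numbers.length + 1) / 2 := by omega
    set e := (numbers.length + 1) / 2 with he
    have hfd : PySem.Int.floordiv (numbers.length : Int) 2 = ((e : Nat) : Int) := by
      have : e = numbers.length / 2 := by omega
      rw [this]; exact_mod_cast PySem.Int.floordiv_natCast numbers.length 2
    rw [hfd, mod_pred_eq k (e : Int) (by exact_mod_cast he0)]
    by_cases hz : PySem.Int.mod k (e : Int) = 0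
    · rw [hz, if_pos rfl]
      simp only [zero_sub]
      have hne : ((List.range e).map (fun t => numbers.getD (2 * t) 0)) ≠ [] := by
        simp only [List.ne_nil_iff_length_pos, List.length_map, List.length_range]; omega
      rw [PySem.List.pyGetD_neg_one _ _ hne, List.getLast_eq_getElem, List.getElem_map]
      have hcast : 2 * ((e : Int) - 1) = ((2 * (e - 1) : Nat) : Int) := by
        have : (1:Int) ≤ (e:Int) := by exact_mod_cast he0
        push_cast [Nat.cast_sub he0]; ring
      rw [hcast, PySem.List.pyGetD_natCast]
      simp only [List.length_map, List.length_range, List.getElem_range]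
    · rw [if_neg hz]
      have hv0 : 0 ≤ PySem.Int.mod k (e : Int) := PySem.Int.mod_nonneg k (by exact_mod_cast he0)
      have hv1 : PySem.Int.mod k (e : Int) < e := PySem.Int.mod_lt k (by exact_mod_cast he0)
      set v := PySem.Int.mod k (e : Int) with hvdef
      rw [PySem.List.pyGetD_of_nonneg _ _ (by omega),
        PySem.List.getD_map_range _ _ _ _ (by omega),
        PySem.List.pyGetD_of_nonneg _ _ (by omega)]
      congr 1
      omega
  · -- odd length
    have hc : ¬ PySem.Int.mod (numbers.length : Int) 2 = 0 := by
      rw [hmod2]; exact_mod_cast hpar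
    rw [if_neg hc, if_neg hc]
    have hr01 : PySem.List.pyRange 0 2 1 = [0, 1] := by decide
    rw [hr01]
    simp only [List.foldl_cons, List.foldl_nil]
    rw [ev_list numbers, od_list numbers]
    simp only [List.length_append, List.length_map, List.length_range]
    have hlen : (numbers.length + 1) / 2 + numbers.length / 2 = numbers.length := by omega
    rw [hlen]
    have he0 : 0 < (numbers.length + 1) / 2 := by omega
    set e := (numbers.length + 1) / 2 with he
    have hfd : PySem.Int.floordiv ((numbers.length : Int) + 1) 2 = ((e : Nat) : Int) := by
      have h1 : ((numbers.length : Int) + 1) = ((numbers.length + 1 : Nat) : Int) := by push_cast; ring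
      rw [h1]; exact_mod_cast PySem.Int.floordiv_natCast (numbers.length + 1) 2
    rw [hfd, mod_pred_eq k (numbers.length : Int) (by exact_mod_cast hn0)]
    by_cases hz : PySem.Int.mod k (numbers.length : Int) = 0
    · rw [hz, if_pos rfl]
      simp only [zero_sub]
      have hne : ((List.range e).map (fun t => numbers.getD (2 * t) 0) ++
          (List.range (numbers.length / 2)).map (fun t => numbers.getD (2 * t + 1) 0)) ≠ [] := by
        simp only [List.ne_nil_iff_length_pos, List.length_append, List.length_map,
          List.length_range]; omega
      rw [PySem.List.pyGetD_neg_one _ _ hne, List.getLast_eq_getElem,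
        ← List.getD_eq_getElem _ 0]
      simp only [List.length_append, List.length_map, List.length_range, hlen]
      rw [cat_getD numbers (numbers.length - 1) (by omega)]
      by_cases hb : ((numbers.length : Int) - 1) < (e : Int)
      · rw [if_pos hb, if_pos (by omega)]
        rw [PySem.List.pyGetD_of_nonneg _ _ (by omega)]
        congr 1
        omega
      · rw [if_neg hb, if_neg (by omega)]
        rw [PySem.List.pyGetD_of_nonneg _ _ (by omega)]
        congr 1
        omega
    · rw [if_neg hz]
      have hv0 : 0 ≤ PySem.Int.mod k (numbers.length : Int) :=
        PySem.Int.mod_nonneg k (by exact_mod_cast hn0)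
      have hv1 : PySem.Int.mod k (numbers.length : Int) < numbers.length :=
        PySem.Int.mod_lt k (by exact_mod_cast hn0)
      set v := PySem.Int.mod k (numbers.length : Int) with hvdef
      rw [PySem.List.pyGetD_of_nonneg _ _ (by omega)]
      rw [show ((List.range e).map (fun t => numbers.getD (2 * t) 0) ++
          (List.range (numbers.length / 2)).map (fun t => numbers.getD (2 * t + 1) 0)).getD
          (v - 1).toNat 0 =
        if (v - 1).toNat < e then numbers.getD (2 * (v - 1).toNat) 0
        else numbers.getD (2 * ((v - 1).toNat - e) + 1) 0 from
        cat_getD numbers (v - 1).toNat (by omega)]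
      by_cases hb : (v - 1) < (e : Int)
      · rw [if_pos (by omega), if_pos hb]
        rw [PySem.List.pyGetD_of_nonneg _ _ (by omega)]
        congr 1
        omega
      · rw [if_neg (by omega), if_neg hb]
        rw [PySem.List.pyGetD_of_nonneg _ _ (by omega)]
        congr 1
        omega
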